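-- pv_equiv track=rewrite | github.com/jamiebrynes7/advent-of-code-2017 | day_4/challenge2.py | serializeWord
-- ===== SOURCE A (Python) =====
-- def serializeWord(word):
--
--     letter_to_count = dict()
--     for letter in word:
--         if letter in letter_to_count:
--             letter_to_count[letter] += 1
--         else:
--             letter_to_count[letter] = 1
--
--     word_token = ""
--     for key in sorted(letter_to_count.keys()):
--         word_token += key + str(letter_to_count[key])
--
--     return word_token
-- ===== SOURCE B (Python) =====
-- def serializeWord(word):
--     s = sorted(word)
--     token = ""
--     i = 0
--     while i < len(s):
--         j = i + 1
--         while j < len(s) and s[j] == s[i]: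
--             j += 1
--         token += s[i] + str(j - i)
--         i = j
--     return token
-- ===== Notes on version B (the rewrite author's own statement) =====
-- stated objective: alternative
-- what changed: Drops the counting dict entirely: B sorts the characters once and emits the signature in a single run-length grouping pass over the sorted sequence (manual run loop), instead of A's hash-count pass plus a sorted-keys pass.
import Mathlib
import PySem

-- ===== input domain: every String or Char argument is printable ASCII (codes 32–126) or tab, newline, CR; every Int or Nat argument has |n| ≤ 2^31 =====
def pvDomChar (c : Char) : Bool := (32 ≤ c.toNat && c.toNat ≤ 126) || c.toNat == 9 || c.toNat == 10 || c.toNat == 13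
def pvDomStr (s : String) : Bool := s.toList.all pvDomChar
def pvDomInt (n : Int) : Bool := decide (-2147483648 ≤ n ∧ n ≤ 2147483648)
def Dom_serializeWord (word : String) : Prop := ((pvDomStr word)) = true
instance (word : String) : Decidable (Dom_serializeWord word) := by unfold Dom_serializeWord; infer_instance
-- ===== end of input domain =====

-- B replaces A's counting dict by sort-then-run-length grouping over the characters (objective: alternative).
-- Python string concatenation is ported on List Char (exact), wrapped by String.mk at the end.

-- ===== PORT A =====
-- A's counting loop: 'if letter in d: d[letter] += 1 else: d[letter] = 1'
def pvCountDict (word : String) : PySem.Dict Char Int :=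
  word.toList.foldl
    (fun d letter =>
      if d.contains letter then d.insert letter (d.getD letter 0 + 1)
      else d.insert letter 1)
    PySem.Dict.empty

def serializeWord (word : String) : String :=
  String.mk
    ((PySem.List.sorted (pvCountDict word).keys (fun x => x) false).foldl
      (fun acc key => acc ++ ([key] ++ PySem.Int.toChars ((pvCountDict word).getD key 0)))
      [])

-- ===== PORT B =====
-- Source B's outer while loop: the inner while scans the run of the current character
-- (takeWhile = how far j advances, dropWhile = continue at i = j); emits char + str(run length)
def pvRle : List Char → List Char
  | [] => []
  | c :: rest =>
      c :: PySem.Int.toChars ((1 : Int) + (rest.takeWhile (fun x => x == c)).length)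
        ++ pvRle (rest.dropWhile (fun x => x == c))
termination_by l => l.length
decreasing_by
  simpa using Nat.lt_succ_of_le (List.length_dropWhile_le _ _)

def serializeWord_alt (word : String) : String :=
  String.mk (pvRle (PySem.List.sorted word.toList (fun x => x) false))

-- ===== PRECONDITION & SPEC =====
def Spec_serializeWord (word : String) (out : String) : Prop := out = serializeWord_alt word
instance (word : String) (out : String) : Decidable (Spec_serializeWord word out) := by unfold Spec_serializeWord; infer_instance

-- ===== CLAIM (what is proved, stated in full; the proofs are below) =====
def Claim_equal_serializeWord : Prop := ∀ (word : String), Dom_serializeWord word → Spec_serializeWord word (serializeWord word)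

-- ===== LEMMAS AND PROOFS =====

-- the distinct run heads of a (sorted) char list, in order; mirrors pvRle's recursion
def pvHeads : List Char → List Char
  | [] => []
  | c :: rest => c :: pvHeads (rest.dropWhile (fun x => x == c))
termination_by l => l.length
decreasing_by
  simpa using Nat.lt_succ_of_le (List.length_dropWhile_le _ _)

-- A's branching count loop builds exactly Counter(word)
theorem pvCountDict_eq_counter (word : String) :
    pvCountDict word = PySem.Dict.counter word.toList := by
  unfold pvCountDict
  rw [← PySem.Dict.foldl_insert_getD_add_one_eq_counter]
  apply PySem.List.foldl_congr_mem
  intro d x _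
  by_cases h : d.contains x
  · simp [h]
  · simp [h, PySem.Dict.getD_of_not_contains d 0 (by simpa using h)]

-- in a sorted list whose elements are all ≥ c, everything after the leading run of c is > c
theorem pv_lt_of_mem_dropWhile {c : Char} {l : List Char}
    (hall : ∀ x ∈ l, c ≤ x) (hs : l.Pairwise (· ≤ ·)) :
    ∀ x ∈ l.dropWhile (fun x => x == c), c < x := by
  induction l with
  | nil => simp
  | cons a t ih =>
    rw [List.pairwise_cons] at hs
    by_cases h : a = c
    · subst h
      simpa using ih (fun x hx => hall x (List.mem_cons_of_mem _ hx)) hs.2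
    · have hbe : (a == c) = false := by simpa using h
      rw [List.dropWhile_cons_of_neg (by simp [hbe])]
      intro x hx
      have hca : c < a := lt_of_le_of_ne (hall _ List.mem_cons_self) (Ne.symm h)
      rcases List.mem_cons.1 hx with rfl | hx
      · exact hca
      · exact lt_of_lt_of_le hca (hs.1 x hx)

theorem pvHeads_subset : ∀ (l : List Char), ∀ x ∈ pvHeads l, x ∈ l := by
  intro l
  induction l using pvHeads.induct with
  | case1 => simp [pvHeads]
  | case2 c rest ih =>
    intro x hx
    rw [pvHeads] at hx
    rcases List.mem_cons.1 hx with rfl | hx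
    · exact List.mem_cons_self
    · exact List.mem_cons_of_mem _ ((rest.dropWhile_sublist _).mem (ih x hx))

theorem pvHeads_mem {l : List Char} (hs : l.Pairwise (· ≤ ·)) :
    ∀ x, x ∈ pvHeads l ↔ x ∈ l := by
  induction l using pvHeads.induct with
  | case1 => simp [pvHeads]
  | case2 c rest ih =>
    intro x
    rw [List.pairwise_cons] at hs
    constructor
    · exact pvHeads_subset _ x
    · intro hx
      rw [pvHeads, List.mem_cons]
      rcases List.mem_cons.1 hx with rfl | hx
      · exact Or.inl rfl
      · by_cases hxc : x = c
        · exact Or.inl hxc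
        · right
          rw [ih ((hs.2).sublist (rest.dropWhile_sublist _)) x]
          have := List.takeWhile_append_dropWhile (p := fun y => y == c) (l := rest)
          rcases (List.mem_append.1 (by rw [this]; exact hx)) with h1 | h2
          · exact absurd (by simpa using List.mem_takeWhile_imp h1) hxc
          · exact h2

theorem pvHeads_pairwise {l : List Char} (hs : l.Pairwise (· ≤ ·)) :
    (pvHeads l).Pairwise (· < ·) := by
  induction l using pvHeads.induct with
  | case1 => simp [pvHeads]
  | case2 c rest ih =>
    rw [List.pairwise_cons] at hs
    rw [pvHeads, List.pairwise_cons]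
    have hrs : (rest.dropWhile (fun x => x == c)).Pairwise (· ≤ ·) :=
      hs.2.sublist (rest.dropWhile_sublist _)
    refine ⟨?_, ih hrs⟩
    intro x hx
    exact pv_lt_of_mem_dropWhile hs.1 hs.2 x (pvHeads_subset _ x hx)

-- B's run-length loop over a sorted list = one block per distinct head, with the full count
theorem pvRle_eq_flatMap {l : List Char} (hs : l.Pairwise (· ≤ ·)) :
    pvRle l = (pvHeads l).flatMap (fun k => k :: PySem.Int.toChars (l.count k)) := by
  induction l using pvRle.induct with
  | case1 => rw [pvRle, pvHeads]; rfl
  | case2 c rest ih =>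
    rw [List.pairwise_cons] at hs
    have hrs : (rest.dropWhile (fun x => x == c)).Pairwise (· ≤ ·) :=
      hs.2.sublist (rest.dropWhile_sublist _)
    have hlt : ∀ x ∈ rest.dropWhile (fun x => x == c), c < x :=
      pv_lt_of_mem_dropWhile hs.1 hs.2
    have hsplit : rest = rest.takeWhile (fun x => x == c) ++ rest.dropWhile (fun x => x == c) :=
      (List.takeWhile_append_dropWhile).symm
    have hct : (rest.takeWhile (fun x => x == c)).count c = (rest.takeWhile (fun x => x == c)).length := by
      rw [List.count_eq_length]
      intro b hb
      have := List.mem_takeWhile_imp hb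
      exact (eq_of_beq this).symm
    have hcr : (rest.dropWhile (fun x => x == c)).count c = 0 := by
      rw [List.count_eq_zero]
      intro hmem
      exact absurd rfl (hlt c hmem).ne
    have hcount : ((c :: rest).count c : Int) = (1 : Int) + (rest.takeWhile (fun x => x == c)).length := by
      rw [List.count_cons_self]
      conv_lhs => rw [hsplit]
      rw [List.count_append, hct, hcr]
      push_cast; ring
    have hkeys : ∀ k ∈ pvHeads (rest.dropWhile (fun x => x == c)),
        (c :: rest).count k = (rest.dropWhile (fun x => x == c)).count k := by
      intro k hk
      have hkr := pvHeads_subset _ k hk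
      have hkc : c < k := hlt k hkr
      have h1 : (c :: rest).count k = rest.count k := by
        have hb : (c == k) = false := by simpa using hkc.ne
        rw [List.count_cons, hb]
        simp
      have h2 : (rest.takeWhile (fun x => x == c)).count k = 0 := by
        rw [List.count_eq_zero]
        intro hmem
        have := List.mem_takeWhile_imp hmem
        exact absurd (by simpa using this) hkc.ne'
      rw [h1]; conv_lhs => rw [hsplit]
      rw [List.count_append, h2]
      omega
    rw [pvRle, pvHeads, List.flatMap_cons, ih hrs]
    congr 1
    · rw [hcount]
    · simp only [List.flatMap_def]
      apply congrArg
      apply List.map_congr_left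
      intro k hk
      rw [hkeys k hk]

-- ===== VERDICT (by name: the statement is the Claim_ definition above) =====
theorem serializeWord_spec : Claim_equal_serializeWord := by
  intro word _
  unfold Spec_serializeWord serializeWord serializeWord_alt
  rw [pvCountDict_eq_counter]
  set wl := word.toList with hwl
  set sl := PySem.List.sorted wl (fun x => x) false with hsl
  have hslp : sl.Perm wl := PySem.List.sorted_perm wl (fun x => x) false
  have hss : sl.Pairwise (· ≤ ·) := PySem.List.sorted_pairwise wl (fun x => x)
  set K := PySem.List.sorted (PySem.Dict.counter wl).keys (fun x => x) false with hK
  have hKperm : K.Perm (PySem.Set.ofList wl) := by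
    rw [hK, PySem.Dict.keys_counter]; exact PySem.List.sorted_perm _ _ _
  have hKnd : K.Nodup := hKperm.nodup_iff.2 (PySem.Set.nodup_ofList wl)
  have hHnd : (pvHeads sl).Nodup := (pvHeads_pairwise hss).imp ne_of_lt
  have hKH : K = pvHeads sl := by
    apply PySem.List.eq_of_perm_of_pairwise_le_of_injective (fun x => x) (fun a b h => h)
    · rw [List.perm_ext_iff_of_nodup hKnd hHnd]
      intro a
      rw [pvHeads_mem hss a, hslp.mem_iff, ← PySem.Set.mem_ofList wl a, ← hKperm.mem_iff]
    · exact PySem.List.sorted_pairwise _ _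
    · exact (pvHeads_pairwise hss).imp le_of_lt
  rw [PySem.List.foldl_append_eq_flatMap, List.nil_append, pvRle_eq_flatMap hss, hKH]
  simp only [List.flatMap_def]
  apply congrArg
  apply congrArg
  apply List.map_congr_left
  intro k hk
  rw [PySem.Dict.getD_counter, hslp.count_eq]
  rfl
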